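-- pv_equiv track=rewrite | github.com/tipsyboy/Algorithm | BOJ/category/Two Pointer - 투 포인터/1484_다이어트.py | search
-- ===== SOURCE A (Python) =====
-- def search(G: int) -> list:
--     lo, hi = 1, 2
--     ans = []
--     while lo < hi and hi < G + 1:
--         temp = hi ** 2 - lo ** 2
--
--         if temp == G:
--             ans.append(hi)
--             lo += 1
--             hi += 1
--         elif temp > G:
--             lo += 1
--         else:
--             hi += 1
--
--     return [-1] if not ans else ans
-- ===== SOURCE B (Python) =====
-- def search(G: int) -> list:
--     res = []
--     d = 1
--     while d * d <= G:
--         if G % d == 0: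
--             s = G // d
--             if (s - d) % 2 == 0 and s - d >= 2:
--                 res.append((s + d) // 2)
--         d += 1
--     return [-1] if not res else res[::-1]
-- ===== Notes on version B (the rewrite author's own statement) =====
-- stated objective: faster
-- what changed: Replaces A's linear two-pointer sweep over (lo, hi) with a square-root-time enumeration of divisor pairs d*s = G, emitting hi = (s+d)//2 for each pair whose gap s-d is even and positive, reversing at the end to match A's increasing order.
import Mathlib
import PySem

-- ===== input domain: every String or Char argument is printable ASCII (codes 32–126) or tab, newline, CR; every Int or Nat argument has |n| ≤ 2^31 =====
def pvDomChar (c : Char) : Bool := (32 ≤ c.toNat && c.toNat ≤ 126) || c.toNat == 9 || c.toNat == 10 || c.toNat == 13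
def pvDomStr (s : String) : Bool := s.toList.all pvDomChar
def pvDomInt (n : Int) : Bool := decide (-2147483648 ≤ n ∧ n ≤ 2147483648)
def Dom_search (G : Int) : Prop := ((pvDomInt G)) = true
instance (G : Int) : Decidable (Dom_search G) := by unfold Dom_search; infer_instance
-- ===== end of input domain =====

-- B replaces A's O(G) two-pointer sweep by an O(√G) divisor-pair enumeration (hi = (G/d + d)/2 for each divisor d with matching parity), reversed to match A's increasing order.

-- ===== PORT A =====
-- the while loop of A, with a Nat fuel as totality guard (state lo, hi, ans; temp = hi**2 - lo**2)
def loopA (fuel : Nat) (G lo hi : Int) (ans : List Int) : List Int :=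
  match fuel with
  | 0 => ans
  | fuel + 1 =>
    if lo < hi ∧ hi < G + 1 then
      if hi * hi - lo * lo = G then loopA fuel G (lo + 1) (hi + 1) (ans ++ [hi])
      else if hi * hi - lo * lo > G then loopA fuel G (lo + 1) hi ans
      else loopA fuel G lo (hi + 1) ans
    else ans

def search (G : Int) : List Int :=
  let ans := loopA ((2 * (G + 1) - 1 - 2).toNat + 1) G 1 2 []
  if ans = [] then [-1] else ans

-- ===== PORT B =====
-- the while loop of B, with a Nat fuel as totality guard (state d, res);
-- appends (s + d) // 2 for each divisor d of G whose gap s - d is even and positive, where s = G // d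
def loopB (fuel : Nat) (G d : Int) (res : List Int) : List Int :=
  match fuel with
  | 0 => res
  | fuel + 1 =>
    if d * d ≤ G then
      if PySem.Int.mod G d = 0 then
        if PySem.Int.mod (PySem.Int.floordiv G d - d) 2 = 0 ∧ PySem.Int.floordiv G d - d ≥ 2 then
          loopB fuel G (d + 1) (res ++ [PySem.Int.floordiv (PySem.Int.floordiv G d + d) 2])
        else loopB fuel G (d + 1) res
      else loopB fuel G (d + 1) res
    else res

def search_alt (G : Int) : List Int :=
  let res := loopB ((G + 1 - 1).toNat + 1) G 1 []
  if res = [] then [-1] else res.reverse  -- res[::-1]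

-- ===== PRECONDITION & SPEC =====
def Spec_search (G : Int) (out : List Int) : Prop := out = search_alt G
instance (G : Int) (out : List Int) : Decidable (Spec_search G out) := by unfold Spec_search; infer_instance

-- ===== CLAIM (what is proved, stated in full; the proofs are below) =====
def Claim_equal_search : Prop := ∀ (G : Int), Dom_search G → Spec_search G (search G)

-- ===== LEMMAS AND PROOFS =====

-- h is a solution height: some base l with h*h - l*l = G
def VValid (G h : Int) : Prop := ∃ l, 1 ≤ l ∧ l < h ∧ h * h - l * l = G

-- d is a divisor of G producing a solution (the condition B tests)
def DivOK (G d : Int) : Prop :=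
  PySem.Int.mod G d = 0 ∧
  PySem.Int.mod (PySem.Int.floordiv G d - d) 2 = 0 ∧
  PySem.Int.floordiv G d - d ≥ 2

def hiOf (G d : Int) : Int := PySem.Int.floordiv (PySem.Int.floordiv G d + d) 2

theorem fd_exact (a b : Int) (hb : 0 < b) (q : Int) (h : a = b * q) :
    PySem.Int.floordiv a b = q := by
  rw [PySem.Int.floordiv_eq_ediv_of_pos hb, h, Int.mul_ediv_cancel_left _ (by omega)]

theorem divok_unpack (G d : Int) (hk : DivOK G d) :
    ∃ m, 1 ≤ m ∧ G = d * (2 * m + d) ∧ PySem.Int.floordiv G d = 2 * m + d ∧ hiOf G d = m + d := by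
  rcases hk with ⟨h0, hpar, hge⟩
  set s := PySem.Int.floordiv G d with hs
  have hdvd : d ∣ G := (PySem.Int.mod_eq_zero_iff_dvd G d).1 h0
  have hGe : s * d + PySem.Int.mod G d = G := PySem.Int.floordiv_mul_add_mod G d
  rw [h0, add_zero] at hGe
  have h2 : (2 : Int) ∣ (s - d) := (PySem.Int.mod_eq_zero_iff_dvd _ 2).1 hpar
  rcases h2 with ⟨m, hm⟩
  have hs2 : s = 2 * m + d := by omega
  refine ⟨m, by omega, by rw [← hGe, hs2]; ring, hs2, ?_⟩
  have : s + d = 2 * (m + d) := by omega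
  unfold hiOf
  rw [← hs, fd_exact _ 2 (by omega) (m + d) this]

theorem valid_iff_div (G h : Int) :
    VValid G h ↔ ∃ d, 1 ≤ d ∧ d * d ≤ G ∧ DivOK G d ∧ h = hiOf G d := by
  constructor
  · rintro ⟨l, hl1, hlh, hG⟩
    refine ⟨h - l, by omega, by nlinarith, ?_, ?_⟩
    · have hG' : G = (h - l) * (h + l) := by linear_combination -hG
      have hfd : PySem.Int.floordiv G (h - l) = h + l := fd_exact _ _ (by omega) _ hG'
      refine ⟨?_, ?_, ?_⟩
      · exact (PySem.Int.mod_eq_zero_iff_dvd _ _).2 ⟨h + l, hG'⟩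
      · rw [hfd]
        exact (PySem.Int.mod_eq_zero_iff_dvd _ _).2 ⟨l, by ring⟩
      · rw [hfd]; omega
    · have hG' : G = (h - l) * (h + l) := by linear_combination -hG
      have hfd : PySem.Int.floordiv G (h - l) = h + l := fd_exact _ _ (by omega) _ hG'
      unfold hiOf
      rw [hfd, fd_exact _ 2 (by omega) h (by ring)]
  · rintro ⟨d, hd1, hsq, hk, hh⟩
    rcases divok_unpack G d hk with ⟨m, hm1, hGe, _, hhi⟩
    exact ⟨m, hm1, by omega, by rw [hh, hhi]; nlinarith⟩

theorem hiOf_strict (G d1 d2 : Int) (h1 : 1 ≤ d1) (h12 : d1 < d2)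
    (hk1 : DivOK G d1) (hk2 : DivOK G d2) : hiOf G d2 < hiOf G d1 := by
  rcases divok_unpack G d1 hk1 with ⟨m1, hm1, hG1, _, hh1⟩
  rcases divok_unpack G d2 hk2 with ⟨m2, hm2, hG2, _, hh2⟩
  rw [hh1, hh2]
  nlinarith [mul_pos (show (0:Int) < d2 - d1 by omega) (show (0:Int) < 2 * m2 + d2 - d1 by omega)]

theorem sorted_mem_eq (l1 l2 : List Int) (s1 : l1.Pairwise (· < ·)) (s2 : l2.Pairwise (· < ·))
    (hm : ∀ x, x ∈ l1 ↔ x ∈ l2) : l1 = l2 := by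
  induction l1 generalizing l2 with
  | nil =>
    cases l2 with
    | nil => rfl
    | cons b t2 => exact absurd ((hm b).2 (List.mem_cons_self)) (by simp)
  | cons a t1 ih =>
    cases l2 with
    | nil => exact absurd ((hm a).1 (List.mem_cons_self)) (by simp)
    | cons b t2 =>
      rcases List.pairwise_cons.1 s1 with ⟨ha, st1⟩
      rcases List.pairwise_cons.1 s2 with ⟨hb, st2⟩
      have hab : a = b := by
        have h1 : a ∈ b :: t2 := (hm a).1 List.mem_cons_self
        have h2 : b ∈ a :: t1 := (hm b).2 List.mem_cons_self
        rcases List.mem_cons.1 h1 with h | h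
        · exact h
        · rcases List.mem_cons.1 h2 with h' | h'
          · omega
          · have := ha b h'; have := hb a h; omega
      subst hab
      have : t1 = t2 := by
        apply ih _ st1 st2
        intro x
        constructor
        · intro hx
          have hxa := ha x hx
          rcases List.mem_cons.1 ((hm x).1 (List.mem_cons_of_mem _ hx)) with h | h
          · omega
          · exact h
        · intro hx
          have hxb := hb x hx
          rcases List.mem_cons.1 ((hm x).2 (List.mem_cons_of_mem _ hx)) with h | h
          · omega
          · exact h
      rw [this]

theorem pv_le_of_sq_le (d G : Int) (h : d * d ≤ G) : d ≤ G := by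
  by_cases hd : d ≤ 0
  · exact le_trans hd (le_trans (mul_self_nonneg d) h)
  · exact le_trans (le_mul_of_one_le_left (by omega) (by omega)) h

theorem loopA_spec (fuel : Nat) (G : Int) : ∀ (lo hi : Int) (ans : List Int),
    (2 * (G + 1) - lo - hi).toNat < fuel →
    1 ≤ lo → lo ≤ hi →
    (lo = hi → G + 1 < 2 * lo) →
    (∀ h, h ∈ ans ↔ VValid G h ∧ h < hi) →
    ans.Pairwise (· < ·) →
    (∀ l h, 1 ≤ l → l < h → hi ≤ h → h * h - l * l = G → lo ≤ l) →
    (∀ h, h ∈ loopA fuel G lo hi ans ↔ VValid G h) ∧ (loopA fuel G lo hi ans).Pairwise (· < ·) := by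
  induction fuel with
  | zero => intro lo hi ans hf; omega
  | succ fuel ih =>
    intro lo hi ans hf h1 h2 hlh hmem hsort hbound
    by_cases hcond : lo < hi ∧ hi < G + 1
    · obtain ⟨hlt, hhi⟩ := hcond
      simp only [loopA]
      rw [if_pos ⟨hlt, hhi⟩]
      by_cases htemp : hi * hi - lo * lo = G
      · rw [if_pos htemp]
        apply ih _ _ _ (by omega) (by omega) (by omega) (by omega)
        · intro h
          simp only [List.mem_append, List.mem_singleton, hmem]
          constructor
          · rintro (⟨hv, hlt'⟩ | rfl)
            · exact ⟨hv, by omega⟩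
            · exact ⟨⟨lo, by omega, by omega, by linarith⟩, by omega⟩
          · rintro ⟨hv, hlt'⟩
            by_cases hcase : h < hi
            · exact Or.inl ⟨hv, hcase⟩
            · right
              rcases hv with ⟨l, hl1, hlh', hGv⟩
              have hllo : lo ≤ l := hbound l h hl1 hlh' (by omega) hGv
              nlinarith
        · refine List.pairwise_append.2 ⟨hsort, List.pairwise_singleton _ _, ?_⟩
          intro x hx y hy
          rw [List.mem_singleton] at hy; subst hy
          exact ((hmem x).1 hx).2
        · intro l h hl1 hlh' hge hGv
          have hllo : lo ≤ l := hbound l h hl1 hlh' (by omega) hGv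
          rcases eq_or_lt_of_le hllo with rfl | h'
          · exfalso; nlinarith
          · omega
      · rw [if_neg htemp]
        by_cases hgt : hi * hi - lo * lo > G
        · rw [if_pos hgt]
          apply ih _ _ _ (by omega) (by omega) (by omega) ?_ hmem hsort ?_
          · intro he; nlinarith
          · intro l h hl1 hlh' hge hGv
            have hllo : lo ≤ l := hbound l h hl1 hlh' hge hGv
            rcases eq_or_lt_of_le hllo with rfl | h'
            · exfalso; nlinarith
            · omega
        · rw [if_neg hgt]
          apply ih _ _ _ (by omega) (by omega) (by omega) (by omega) ?_ hsort
            (fun l h hl1 hlh' hge hGv => hbound l h hl1 hlh' (by omega) hGv)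
          intro h
          rw [hmem h]
          constructor
          · rintro ⟨hv, hlt'⟩; exact ⟨hv, by omega⟩
          · rintro ⟨hv, hlt'⟩
            refine ⟨hv, ?_⟩
            by_cases hcase : h < hi
            · exact hcase
            · exfalso
              have hh : h = hi := by omega
              subst hh
              rcases hv with ⟨l, hl1, hlh', hGv⟩
              have hllo : lo ≤ l := hbound l h hl1 hlh' (by omega) hGv
              have hll : l * l = lo * lo := by nlinarith
              have : h * h - lo * lo = G := by rw [← hll]; exact hGv
              exact htemp this
    · simp only [loopA]
      rw [if_neg hcond]
      rw [not_and_or] at hcond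
      constructor
      · intro h
        rw [hmem h]
        constructor
        · exact fun ⟨hv, _⟩ => hv
        · intro hv
          refine ⟨hv, ?_⟩
          rcases hv with ⟨l, hl1, hlh', hGv⟩
          rcases hcond with hc | hc
          · have heq : lo = hi := by omega
            have hG2 : G + 1 < 2 * lo := hlh heq
            by_contra hge
            have hllo : lo ≤ l := hbound l h hl1 hlh' (by omega) hGv
            nlinarith
          · by_contra hge
            nlinarith
      · exact hsort

theorem loopB_spec (fuel : Nat) (G : Int) : ∀ (d : Int) (res : List Int),
    (G + 1 - d).toNat < fuel →
    1 ≤ d →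
    (∀ h, h ∈ res ↔ ∃ d', 1 ≤ d' ∧ d' < d ∧ d' * d' ≤ G ∧ DivOK G d' ∧ h = hiOf G d') →
    res.Pairwise (· > ·) →
    (∀ h, h ∈ loopB fuel G d res ↔ ∃ d', 1 ≤ d' ∧ d' * d' ≤ G ∧ DivOK G d' ∧ h = hiOf G d') ∧
      (loopB fuel G d res).Pairwise (· > ·) := by
  induction fuel with
  | zero => intro d res hf; omega
  | succ fuel ih =>
    intro d res hf hd hmem hsort
    by_cases hsq : d * d ≤ G
    · have hdG : d ≤ G := pv_le_of_sq_le d G hsq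
      simp only [loopB]
      rw [if_pos hsq]
      by_cases hmod : PySem.Int.mod G d = 0
      · rw [if_pos hmod]
        by_cases hpar : PySem.Int.mod (PySem.Int.floordiv G d - d) 2 = 0 ∧ PySem.Int.floordiv G d - d ≥ 2
        · rw [if_pos hpar]
          apply ih _ _ (by omega) (by omega) ?_ ?_
          · intro h
            simp only [List.mem_append, List.mem_singleton, hmem]
            constructor
            · rintro (⟨d', hd1, hdlt, hds, hk, hh⟩ | rfl)
              · exact ⟨d', hd1, by omega, hds, hk, hh⟩
              · exact ⟨d, hd, by omega, hsq, ⟨hmod, hpar.1, hpar.2⟩, rfl⟩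
            · rintro ⟨d', hd1, hdlt, hds, hk, hh⟩
              by_cases hcase : d' < d
              · exact Or.inl ⟨d', hd1, hcase, hds, hk, hh⟩
              · have : d' = d := by omega
                subst this
                exact Or.inr hh
          · refine List.pairwise_append.2 ⟨hsort, List.pairwise_singleton _ _, ?_⟩
            intro x hx y hy
            rw [List.mem_singleton] at hy; subst hy
            rcases (hmem x).1 hx with ⟨d', hd1, hdlt, hds, hk, rfl⟩
            exact hiOf_strict G d' d hd1 hdlt hk ⟨hmod, hpar.1, hpar.2⟩
        · rw [if_neg hpar]
          apply ih _ _ (by omega) (by omega) ?_ hsort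
          intro h
          rw [hmem h]
          constructor
          · rintro ⟨d', hd1, hdlt, hds, hk, hh⟩
            exact ⟨d', hd1, by omega, hds, hk, hh⟩
          · rintro ⟨d', hd1, hdlt, hds, hk, hh⟩
            refine ⟨d', hd1, ?_, hds, hk, hh⟩
            rcases lt_or_eq_of_le (by omega : d' ≤ d) with h' | rfl
            · exact h'
            · exact absurd ⟨hk.2.1, hk.2.2⟩ hpar
      · rw [if_neg hmod]
        apply ih _ _ (by omega) (by omega) ?_ hsort
        intro h
        rw [hmem h]
        constructor
        · rintro ⟨d', hd1, hdlt, hds, hk, hh⟩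
          exact ⟨d', hd1, by omega, hds, hk, hh⟩
        · rintro ⟨d', hd1, hdlt, hds, hk, hh⟩
          refine ⟨d', hd1, ?_, hds, hk, hh⟩
          rcases lt_or_eq_of_le (by omega : d' ≤ d) with h' | rfl
          · exact h'
          · exact absurd hk.1 hmod
    · simp only [loopB]
      rw [if_neg hsq]
      refine ⟨fun h => ?_, hsort⟩
      rw [hmem h]
      constructor
      · rintro ⟨d', hd1, _, hds, hk, hh⟩; exact ⟨d', hd1, hds, hk, hh⟩
      · rintro ⟨d', hd1, hds, hk, hh⟩
        refine ⟨d', hd1, ?_, hds, hk, hh⟩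
        by_contra hlt'
        have hdd : d ≤ d' := by omega
        have hGd : G < d * d := by omega
        nlinarith

-- ===== VERDICT (by name: the statement is the Claim_ definition above) =====
theorem search_spec : Claim_equal_search := by
  intro G _
  unfold Spec_search search search_alt
  have hA := loopA_spec ((2 * (G + 1) - 1 - 2).toNat + 1) G 1 2 [] (by omega) (by omega) (by omega) (by omega)
    (by
      intro h
      constructor
      · intro hx; cases hx
      · rintro ⟨⟨l, hl1, hlh', _⟩, hlt⟩; exact absurd hlt (by omega))
    List.Pairwise.nil
    (by intro l h hl1 _ _ _; omega)
  have hB := loopB_spec ((G + 1 - 1).toNat + 1) G 1 [] (by omega)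
    (by omega)
    (by
      intro h
      constructor
      · intro hx; cases hx
      · rintro ⟨d', hd1, hdlt, _⟩; omega)
    List.Pairwise.nil
  have hrevsort : (loopB ((G + 1 - 1).toNat + 1) G 1 []).reverse.Pairwise (· < ·) := by
    rw [List.pairwise_reverse]
    exact hB.2
  have hE : loopA ((2 * (G + 1) - 1 - 2).toNat + 1) G 1 2 [] = (loopB ((G + 1 - 1).toNat + 1) G 1 []).reverse := by
    apply sorted_mem_eq _ _ hA.2 hrevsort
    intro x
    rw [hA.1, List.mem_reverse, hB.1, ← valid_iff_div]
  simp only [hE, List.reverse_eq_nil_iff]
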